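-- pv_equiv track=rewrite | github.com/dirediredock/Census-Stub | FIGURES/FIGURE_SensitivityAnalysis/FIG_ParameterER_p.py | COLLECT_VECTOR
-- ===== SOURCE A (Python) =====
-- def COLLECT_VECTOR(source_node, D):
--     Q = [source_node]
--     visited_nodes = set(Q)
--     visited_edges = set()
--     visited_stubs = set()
--     vector_of_node_degrees = []
--     vector_of_edge_degrees = []
--     vector_of_stub_degrees = []
--     while len(Q) > 0:
--         node_degree = 0
--         edge_degree = 0
--         stub_degree = 0
--         current_stubs = set()
--         upcoming_nodes = []
--         for node in Q:
--             neighbors = D[node].keys()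
--             for neighbor in neighbors:
--                 if neighbor not in visited_nodes:
--                     upcoming_nodes.append(neighbor)
--                     node_degree += 1
--                 visited_nodes.add(neighbor)
--                 edge = (min(node, neighbor), max(node, neighbor))
--                 if edge not in visited_edges:
--                     edge_degree += 1
--                 visited_edges.add(edge)
--                 stub = (node, neighbor)
--                 if stub not in visited_stubs:
--                     stub_degree += 1
--                 current_stubs.add(stub)
--                 visited_stubs.add(stub)
--         for stub in current_stubs:
--             visited_stubs.add((stub[1], stub[0]))
--         vector_of_node_degrees.append(node_degree)
--         vector_of_edge_degrees.append(edge_degree)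
--         vector_of_stub_degrees.append(stub_degree)
--         Q = upcoming_nodes
--     return (
--         vector_of_node_degrees,
--         vector_of_edge_degrees,
--         vector_of_stub_degrees,
--     )
-- ===== SOURCE B (Python) =====
-- def COLLECT_VECTOR(source_node, D):
--     # Phase 1: single-queue BFS computing only distance labels.
--     dist = {source_node: 0}
--     order = [source_node]
--     i = 0
--     while i < len(order):
--         u = order[i]
--         i += 1
--         for v in D[u]:
--             if v not in dist:
--                 dist[v] = dist[u] + 1
--                 order.append(v)
--     depth = max(dist.values())
--     node_vec = [0] * (depth + 1)
--     edge_vec = [0] * (depth + 1)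
--     stub_vec = [0] * (depth + 1)
--     # Phase 2: stateless classification of nodes and arcs by distance rules.
--     for dv in dist.values():
--         if dv > 0:
--             node_vec[dv - 1] += 1
--     for u in order:
--         du = dist[u]
--         for v in D[u]:
--             dv = dist[v]
--             rev = u in D[v]
--             if u == v or not rev or du < dv or (du == dv and u < v):
--                 edge_vec[du] += 1
--             if not (rev and dv < du):
--                 stub_vec[du] += 1
--     return (node_vec, edge_vec, stub_vec)
-- ===== Notes on version B (the rewrite author's own statement) =====
-- stated objective: alternative
-- what changed: A interleaves counting with the traversal: one level-by-level BFS that maintains visited node/edge/stub sets, per-level counters and an explicit reverse-stub update; B is two phases: a plain single-queue BFS that computes only distance labels, then a stateless classification pass that derives all three vectors from closed-form distance rules per node and per arc (no visited-edge/stub sets, no per-level counting).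
import Mathlib
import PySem

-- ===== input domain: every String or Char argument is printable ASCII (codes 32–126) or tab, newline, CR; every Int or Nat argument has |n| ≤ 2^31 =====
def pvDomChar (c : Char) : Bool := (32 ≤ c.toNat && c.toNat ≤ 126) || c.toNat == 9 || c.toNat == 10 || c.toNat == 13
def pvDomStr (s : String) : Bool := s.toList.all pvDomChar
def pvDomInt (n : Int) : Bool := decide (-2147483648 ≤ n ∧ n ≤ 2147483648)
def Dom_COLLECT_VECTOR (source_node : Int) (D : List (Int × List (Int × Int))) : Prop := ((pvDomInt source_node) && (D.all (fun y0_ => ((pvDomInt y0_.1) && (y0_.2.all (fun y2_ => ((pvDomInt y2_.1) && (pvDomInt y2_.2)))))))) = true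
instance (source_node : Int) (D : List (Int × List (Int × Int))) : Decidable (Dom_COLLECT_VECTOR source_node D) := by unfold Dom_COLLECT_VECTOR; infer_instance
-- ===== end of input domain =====

-- B replaces A's single BFS with interleaved incremental counting (three visited sets and
-- per-level counters) by a two-phase algorithm: a plain single-queue BFS computing only
-- distance labels, then a stateless classification pass that counts each node and arc from
-- closed-form distance rules (objective: alternative decomposition, no speed claim).

-- D[node].keys() for the Python dict the association lists denote (both ports do this lookup);
-- the getD [] default is only reached where Python raises KeyError, i.e. outside Pre_.
def pvNeighbors (D : List (Int × List (Int × Int))) (node : Int) : List Int :=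
  (PySem.Dict.ofList (PySem.Dict.getD (PySem.Dict.ofList D) node [])).keys

-- Both Pythons are while-loops, ported with fuel 2 + Σ|adj|; the fuel-exhaustion branch is
-- provably unreachable (A runs one level per step, B one node per step, and both level count
-- and node count are bounded by 1 + Σ|adj|).
def pvFuel (D : List (Int × List (Int × Int))) : Nat :=
  2 + (D.map (fun p => p.2.length)).sum

-- ===== PORT A =====

-- the mutable state of A's level loop: visited nodes/edges/stubs, current_stubs,
-- upcoming_nodes, and the three per-level counters
structure PvStA where
  vn : PySem.Set Int
  ve : PySem.Set (Int × Int)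
  vs : PySem.Set (Int × Int)
  cs : PySem.Set (Int × Int)
  up : List Int
  nd : Int
  ed : Int
  sd : Int
  deriving Repr, DecidableEq

-- the body of A's inner 'for neighbor in neighbors' loop, statement for statement
def pvProcA (node : Int) (st : PvStA) (neighbor : Int) : PvStA :=
  let (up, nd) :=
    if PySem.Set.contains st.vn neighbor then (st.up, st.nd)
    else (st.up ++ [neighbor], st.nd + 1)
  let vn := PySem.Set.add st.vn neighbor
  let edge := (min node neighbor, max node neighbor)
  let ed := if PySem.Set.contains st.ve edge then st.ed else st.ed + 1
  let ve := PySem.Set.add st.ve edge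
  let stub := (node, neighbor)
  let sd := if PySem.Set.contains st.vs stub then st.sd else st.sd + 1
  let cs := PySem.Set.add st.cs stub
  let vs := PySem.Set.add st.vs stub
  { vn := vn, ve := ve, vs := vs, cs := cs, up := up, nd := nd, ed := ed, sd := sd }

-- one iteration of A's while-loop body (the two nested for-loops)
def pvLevelA (D : List (Int × List (Int × Int))) (Q : List Int)
    (vn : PySem.Set Int) (ve vs : PySem.Set (Int × Int)) : PvStA :=
  Q.foldl (fun st node => (pvNeighbors D node).foldl (pvProcA node) st)
    { vn := vn, ve := ve, vs := vs, cs := PySem.Set.empty, up := [], nd := 0, ed := 0, sd := 0 }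

-- A's while-loop (fuel-guarded; see pvFuel)
def pvLoopA (D : List (Int × List (Int × Int))) :
    Nat → List Int → PySem.Set Int → PySem.Set (Int × Int) → PySem.Set (Int × Int) →
    List Int → List Int → List Int → List Int × List Int × List Int
  | 0, _, _, _, _, an, ae, asv => (an, ae, asv)
  | fuel + 1, Q, vn, ve, vs, an, ae, asv =>
    if 0 < Q.length then
      let st := pvLevelA D Q vn ve vs
      -- 'for stub in current_stubs: visited_stubs.add((stub[1], stub[0]))' — iterates a set,
      -- but the resulting set is only ever used through membership, so the order is immaterial
      let vs2 := st.cs.foldl (fun s p => PySem.Set.add s (p.2, p.1)) st.vs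
      pvLoopA D fuel st.up st.vn st.ve vs2 (an ++ [st.nd]) (ae ++ [st.ed]) (asv ++ [st.sd])
    else (an, ae, asv)

def COLLECT_VECTOR (source_node : Int) (D : List (Int × List (Int × Int))) : List Int × List Int × List Int :=
  pvLoopA D (pvFuel D) [source_node] (PySem.Set.ofList [source_node])
    PySem.Set.empty PySem.Set.empty [] [] []

-- ===== PORT B =====

-- the body of B's inner 'for v in D[u]' loop of phase 1 (state: pending suffix of order, dist)
def pvBfsStep (D : List (Int × List (Int × Int))) (u : Int)
    (s : List Int × PySem.Dict Int Int) (v : Int) : List Int × PySem.Dict Int Int :=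
  if s.2.contains v then s else (s.1 ++ [v], s.2.insert v (s.2.getD u 0 + 1))

-- B's phase-1 while-loop over the order/i cursor, represented as the processed prefix
-- (done = order[:i]) and the pending suffix (pend = order[i:]); appends go to pend's end
def pvBfsLoop (D : List (Int × List (Int × Int))) :
    Nat → List Int → List Int → PySem.Dict Int Int → List Int × PySem.Dict Int Int
  | 0, done, _, m => (done, m)
  | fuel + 1, done, pend, m =>
    match pend with
    | [] => (done, m)
    | u :: rest =>
      let s := (pvNeighbors D u).foldl (pvBfsStep D u) (rest, m)
      pvBfsLoop D fuel (done ++ [u]) s.1 s.2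

-- vec[i] += 1
def pvBump (vec : List Int) (i : Int) : List Int :=
  PySem.List.pySetD vec i (PySem.List.pyGetD vec i 0 + 1)

-- u == v or not rev or du < dv or (du == dv and u < v)
def pvEdgeOK (D : List (Int × List (Int × Int))) (m : PySem.Dict Int Int) (u v : Int) : Bool :=
  u == v || !(PySem.Set.contains (pvNeighbors D v) u) || decide (m.getD u 0 < m.getD v 0)
    || (m.getD u 0 == m.getD v 0 && decide (u < v))

-- not (rev and dv < du)
def pvStubOK (D : List (Int × List (Int × Int))) (m : PySem.Dict Int Int) (u v : Int) : Bool :=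
  !(PySem.Set.contains (pvNeighbors D v) u && decide (m.getD v 0 < m.getD u 0))

def COLLECT_VECTOR_alt (source_node : Int) (D : List (Int × List (Int × Int))) : List Int × List Int × List Int :=
  let r := pvBfsLoop D (pvFuel D) [] [source_node] (PySem.Dict.ofList [(source_node, 0)])
  let m := r.2
  -- max(dist.values()): dist is never empty, so the .getD 0 default is unreachable
  let depth := (PySem.List.max? m.values (fun x => x)).getD 0
  let zeros : List Int := List.replicate (depth + 1).toNat 0
  let node_vec := m.values.foldl (fun vec dv => if 0 < dv then pvBump vec (dv - 1) else vec) zeros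
  let es := r.1.foldl (fun (p : List Int × List Int) u =>
      (pvNeighbors D u).foldl (fun (q : List Int × List Int) v =>
        (if pvEdgeOK D m u v then pvBump q.1 (m.getD u 0) else q.1,
         if pvStubOK D m u v then pvBump q.2 (m.getD u 0) else q.2)) p)
    (zeros, zeros)
  (node_vec, es.1, es.2)

-- ===== PRECONDITION & SPEC =====
-- Python A does D[node] for every node it discovers and raises KeyError when that node is not a
-- key of D (Python B raises on exactly the same inputs, at D[u] / D[v]). Pre_ states exactly the
-- raise-free inputs: every node reachable from the source through keyed nodes is itself a key of
-- D. pvReach computes that reachable set by the standard monotone closure (D.length + 1 expansion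
-- steps always suffice, since each non-final step adds at least one new key and D has at most
-- D.length keys); it computes no degree vectors and is shared with neither port.
def pvReach (D : List (Int × List (Int × Int))) (source_node : Int) : PySem.Set Int :=
  (fun R => R.foldl
      (fun acc n => PySem.Set.update acc
        ((PySem.Dict.getD (PySem.Dict.ofList D) n []).map Prod.fst)) R)^[D.length + 1]
    (PySem.Set.ofList [source_node])

def Pre_COLLECT_VECTOR (source_node : Int) (D : List (Int × List (Int × Int))) : Prop :=
  ∀ n ∈ pvReach D source_node, PySem.Dict.contains (PySem.Dict.ofList D) n = true
instance (source_node : Int) (D : List (Int × List (Int × Int))) : Decidable (Pre_COLLECT_VECTOR source_node D) := by unfold Pre_COLLECT_VECTOR; infer_instance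

def pvWitness_COLLECT_VECTOR : Int × (List (Int × List (Int × Int))) :=
  (0, [(0, [(1, 7)]), (1, [(0, 7), (1, 7)])])

def Spec_COLLECT_VECTOR (source_node : Int) (D : List (Int × List (Int × Int))) (out : List Int × List Int × List Int) : Prop := out = COLLECT_VECTOR_alt source_node D
instance (source_node : Int) (D : List (Int × List (Int × Int))) (out : List Int × List Int × List Int) : Decidable (Spec_COLLECT_VECTOR source_node D out) := by unfold Spec_COLLECT_VECTOR; infer_instance

-- ===== CLAIM (what is proved, stated in full; the proofs are below) =====
def Claim_equal_COLLECT_VECTOR : Prop := ∀ (source_node : Int) (D : List (Int × List (Int × Int))), Dom_COLLECT_VECTOR source_node D → Pre_COLLECT_VECTOR source_node D → Spec_COLLECT_VECTOR source_node D (COLLECT_VECTOR source_node D)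

-- ===== LEMMAS AND PROOFS =====


-- the first occurrences in l of elements not in s, in order: simultaneously A's
-- 'upcoming_nodes' accumulator and the counting scheme behind all three counters
def pvNew {α : Type} [BEq α] (s : PySem.Set α) : List α → List α
  | [] => []
  | x :: xs => if PySem.Set.contains s x then pvNew s xs else x :: pvNew (PySem.Set.add s x) xs

theorem pv_contains_add {α : Type} [BEq α] [LawfulBEq α] (s : PySem.Set α) (x y : α) :
    PySem.Set.contains (PySem.Set.add s x) y = (PySem.Set.contains s y || y == x) := by
  by_cases h : y ∈ PySem.Set.add s x
  · rcases (PySem.Set.mem_add s x y).mp h with h' | h'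
    · simp [h, h']
    · subst h'; simp [h]
  · have h1 : ¬ y ∈ s := fun hy => h ((PySem.Set.mem_add s x y).mpr (Or.inl hy))
    have h2 : ¬ y = x := fun hy => h ((PySem.Set.mem_add s x y).mpr (Or.inr hy))
    simp [h, h1, beq_eq_false_iff_ne, h2]

theorem pv_new_eq {α : Type} [BEq α] [LawfulBEq α] (s : PySem.Set α) (l : List α) :
    (PySem.Set.ofList l).filter (fun x => !PySem.Set.contains s x) = pvNew s l := by
  induction l generalizing s with
  | nil => rfl
  | cons x t ih =>
    rw [PySem.Set.ofList_cons, List.filter_cons]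
    by_cases h : PySem.Set.contains s x = true
    · rw [if_neg (by simp [(PySem.Set.contains_iff s x).mp h]), pvNew, if_pos h, ← ih s, PySem.Set.discard, List.filter_filter]
      refine List.filter_congr ?_
      intro y _
      by_cases hyx : y = x
      · subst hyx
        simp [(PySem.Set.contains_iff s y).mp h]
      · simp [beq_eq_false_iff_ne, hyx]
    · rw [if_pos (by simp [Bool.not_eq_true] at h ⊢; exact h), pvNew, if_neg h,
        ← ih (PySem.Set.add s x), PySem.Set.discard, List.filter_filter]
      congr 1
      refine List.filter_congr ?_
      intro y _
      rw [pv_contains_add]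
      by_cases hyx : y = x
      · subst hyx; simp
      · simp [beq_eq_false_iff_ne, hyx]

theorem pv_mem_new {α : Type} [BEq α] [LawfulBEq α] (s : PySem.Set α) (l : List α) (x : α) :
    x ∈ pvNew s l ↔ x ∈ l ∧ x ∉ s := by
  rw [← pv_new_eq]
  simp [List.mem_filter, PySem.Set.mem_ofList, PySem.Set.contains_iff]

theorem pv_nodup_new {α : Type} [BEq α] [LawfulBEq α] (s : PySem.Set α) (l : List α) :
    (pvNew s l).Nodup := by
  rw [← pv_new_eq]
  exact (PySem.Set.nodup_ofList l).filter _

theorem pv_ofList_of_nodup {α : Type} [BEq α] [LawfulBEq α] (l : List α) (h : l.Nodup) :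
    PySem.Set.ofList l = l := by
  induction l with
  | nil => rfl
  | cons x t ih =>
    rw [PySem.Set.ofList_cons, ih h.of_cons]
    have : t.filter (fun y => !y == x) = t := by
      refine List.filter_eq_self.mpr ?_
      intro y hy
      have : y ≠ x := fun he => (List.nodup_cons.mp h).1 (he ▸ hy)
      simp [this]
    simpa [PySem.Set.discard] using this

theorem pv_new_eq_filter {α : Type} [BEq α] [LawfulBEq α] (s : PySem.Set α) (l : List α)
    (h : l.Nodup) : pvNew s l = l.filter (fun x => !PySem.Set.contains s x) := by
  rw [← pv_new_eq, pv_ofList_of_nodup l h]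

theorem pv_nested_foldl {σ : Type} (Q : List Int) (f : Int → List Int)
    (g : Int → σ → Int → σ) (st : σ) :
    Q.foldl (fun s u => (f u).foldl (g u) s) st
      = (Q.flatMap (fun u => (f u).map (fun v => (u, v)))).foldl (fun s p => g p.1 s p.2) st := by
  induction Q generalizing st with
  | nil => rfl
  | cons u t ih => simp [List.foldl_append, List.foldl_map, ih]

def pvEdge (p : Int × Int) : Int × Int := (min p.1 p.2, max p.1 p.2)

-- [(u, v) for u in Q for v in D[u].keys()]
def pvPairs (D : List (Int × List (Int × Int))) (Q : List Int) : List (Int × Int) :=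
  Q.flatMap (fun u => (pvNeighbors D u).map (fun v => (u, v)))

theorem pv_procA_foldl (l : List (Int × Int)) (st : PvStA) :
    l.foldl (fun s p => pvProcA p.1 s p.2) st =
      { vn := PySem.Set.update st.vn (l.map Prod.snd),
        ve := PySem.Set.update st.ve (l.map pvEdge),
        vs := PySem.Set.update st.vs l,
        cs := PySem.Set.update st.cs l,
        up := st.up ++ pvNew st.vn (l.map Prod.snd),
        nd := st.nd + (pvNew st.vn (l.map Prod.snd)).length,
        ed := st.ed + (pvNew st.ve (l.map pvEdge)).length,
        sd := st.sd + (pvNew st.vs l).length } := by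
  induction l generalizing st with
  | nil => simp [PySem.Set.update, pvNew]
  | cons p t ih =>
    rw [List.foldl_cons, ih]
    simp only [List.map_cons, PySem.Set.update, List.foldl_cons, pvNew]
    by_cases h1 : p.2 ∈ st.vn <;>
      by_cases h2 : (min p.1 p.2, max p.1 p.2) ∈ st.ve <;>
        by_cases h3 : p ∈ st.vs <;>
          · simp only [pvProcA, pvEdge, h1, h2, h3, PySem.Set.contains_iff,
              decide_true, decide_false, PySem.Set.contains, List.contains_iff_mem,
              if_true, if_false, Prod.mk.eta, decide_eq_true_eq]
            simp [h1, h2, h3, PvStA.mk.injEq, List.append_assoc] <;> omega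

theorem pv_levelA_eq (D : List (Int × List (Int × Int))) (Q : List Int)
    (vn : PySem.Set Int) (ve vs : PySem.Set (Int × Int)) :
    pvLevelA D Q vn ve vs =
      { vn := PySem.Set.update vn ((pvPairs D Q).map Prod.snd),
        ve := PySem.Set.update ve ((pvPairs D Q).map pvEdge),
        vs := PySem.Set.update vs (pvPairs D Q),
        cs := PySem.Set.ofList (pvPairs D Q),
        up := pvNew vn ((pvPairs D Q).map Prod.snd),
        nd := ((pvNew vn ((pvPairs D Q).map Prod.snd)).length : Int),
        ed := ((pvNew ve ((pvPairs D Q).map pvEdge)).length : Int),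
        sd := ((pvNew vs (pvPairs D Q)).length : Int) } := by
  unfold pvLevelA pvPairs
  rw [pv_nested_foldl Q (pvNeighbors D) pvProcA, pv_procA_foldl]
  simp [PySem.Set.update, PySem.Set.ofList_eq_foldl, PySem.Set.empty]

-- first-extremal spec of PySem.List.max? with the identity key, on Int lists
def pvMaxStep (acc : Option Int) (x : Int) : Option Int :=
  match acc with
  | none => some x
  | some mx => if mx < x then some x else some mx

theorem pv_max?_eq (xs : List Int) :
    PySem.List.max? xs (fun x => x) = xs.foldl pvMaxStep none := by
  unfold PySem.List.max?
  congr 1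
  funext acc y
  cases acc <;> simp [pvMaxStep]

theorem pv_max_aux (xs : List Int) : ∀ a : Int, ∃ x,
    xs.foldl pvMaxStep (some a) = some x ∧
    (x = a ∨ x ∈ xs) ∧ a ≤ x ∧ ∀ y ∈ xs, y ≤ x := by
  induction xs with
  | nil => exact fun a => ⟨a, rfl, Or.inl rfl, le_refl a, by simp⟩
  | cons y t ih =>
    intro a
    by_cases h : a < y
    · obtain ⟨x, hx, hmem, hle, hall⟩ := ih y
      refine ⟨x, by simpa [pvMaxStep, h] using hx, ?_, le_of_lt (lt_of_lt_of_le h hle), ?_⟩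
      · rcases hmem with h' | h' <;> simp [h']
      · intro z hz
        rcases List.mem_cons.mp hz with h' | h'
        · exact h' ▸ hle
        · exact hall z h'
    · obtain ⟨x, hx, hmem, hle, hall⟩ := ih a
      refine ⟨x, by simpa [pvMaxStep, h] using hx, ?_, hle, ?_⟩
      · rcases hmem with h' | h' <;> simp [h']
      · intro z hz
        rcases List.mem_cons.mp hz with h' | h'
        · subst h'; omega
        · exact hall z h'

theorem pv_max?_spec (a : Int) (t : List Int) :
    ∃ x, PySem.List.max? (a :: t) (fun x => x) = some x ∧ x ∈ a :: t ∧ ∀ y ∈ a :: t, y ≤ x := by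
  obtain ⟨x, hx, hmem, hle, hall⟩ := pv_max_aux t a
  refine ⟨x, ?_, ?_, ?_⟩
  · rw [pv_max?_eq, List.foldl_cons]
    exact hx
  · rcases hmem with h | h <;> simp [h]
  · intro y hy
    rcases List.mem_cons.mp hy with h | h
    · exact h ▸ hle
    · exact hall y h

-- ===== B-side: correctness of the queue BFS (phase 1) =====

def pvMd (m : PySem.Dict Int Int) (v : Int) : Int := m.getD v 0

def pvAllVals (D : List (Int × List (Int × Int))) : List Int :=
  D.flatMap (fun p => p.2.map (fun q => q.1))

theorem pv_get?_update_mem {α : Type} (ps : List (Int × α)) :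
    ∀ (d : PySem.Dict Int α) (k : Int) (l : α),
      (d.update ps).get? k = some l → (k, l) ∈ ps ∨ d.get? k = some l := by
  induction ps with
  | nil => intro d k l h; exact Or.inr h
  | cons p t ih =>
    intro d k l h
    have : d.update (p :: t) = (d.insert p.1 p.2).update t := rfl
    rw [this] at h
    rcases ih _ k l h with h' | h'
    · exact Or.inl (List.mem_cons_of_mem _ h')
    · rw [PySem.Dict.get?_insert] at h'
      by_cases hk : k = p.1
      · subst hk
        rw [if_pos rfl] at h'
        have hl : p.2 = l := by simpa using h'
        subst hl
        exact Or.inl (List.mem_cons.mpr (Or.inl Prod.mk.eta.symm))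
      · rw [if_neg hk] at h'
        exact Or.inr h'

theorem pv_get?_ofList_mem {α : Type} (ps : List (Int × α)) (k : Int) (l : α)
    (h : (PySem.Dict.ofList ps).get? k = some l) : (k, l) ∈ ps := by
  rcases pv_get?_update_mem ps PySem.Dict.empty k l h with h' | h'
  · exact h'
  · simp [PySem.Dict.get?_empty] at h'

theorem pv_mem_keys_get? {α : Type} (d : PySem.Dict Int α) (k : Int) (h : k ∈ d.keys) :
    ∃ l, d.get? k = some l := by
  cases hg : d.get? k with
  | none => exact absurd ((PySem.Dict.get?_eq_none_iff_not_mem_keys d k).mp hg h).elim id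
  | some l => exact ⟨l, rfl⟩

theorem pv_mem_nbrs_val (D : List (Int × List (Int × Int))) (u v : Int)
    (h : v ∈ pvNeighbors D u) : v ∈ pvAllVals D := by
  unfold pvNeighbors at h
  obtain ⟨w, hw⟩ := pv_mem_keys_get? _ v h
  have hv := pv_get?_ofList_mem _ v w hw
  cases hadj : (PySem.Dict.ofList D).get? u with
  | none =>
    rw [PySem.Dict.getD_eq_get?_getD, hadj] at hv
    simp at hv
  | some adj =>
    rw [PySem.Dict.getD_eq_get?_getD, hadj] at hv
    have hmem := pv_get?_ofList_mem D u adj hadj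
    unfold pvAllVals
    rw [List.mem_flatMap]
    exact ⟨(u, adj), hmem, List.mem_map.mpr ⟨(v, w), hv, rfl⟩⟩

theorem pv_contains_false {α : Type} [BEq α] [LawfulBEq α] (s : PySem.Set α) (x : α)
    (h : x ∉ s) : PySem.Set.contains s x = false := by
  cases hc : PySem.Set.contains s x
  · rfl
  · exact absurd ((PySem.Set.contains_iff s x).mp hc) h

structure PvBfsInv (D : List (Int × List (Int × Int))) (src : Int)
    (done pend : List Int) (m : PySem.Dict Int Int) : Prop where
  hkeys : m.keys = done ++ pend
  hnodup : (done ++ pend).Nodup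
  hsrcMem : src ∈ done ++ pend
  hsrcZero : pvMd m src = 0
  hnonneg : ∀ v ∈ done ++ pend, 0 ≤ pvMd m v
  hzeroSrc : ∀ v ∈ done ++ pend, pvMd m v = 0 → v = src
  hsorted : List.Pairwise (fun a b => pvMd m a ≤ pvMd m b) (done ++ pend)
  hspan : ∀ p ∈ pend, ∀ q ∈ pend, pvMd m q ≤ pvMd m p + 1
  hclosure : ∀ u ∈ done, ∀ v ∈ pvNeighbors D u, v ∈ done ++ pend ∧ pvMd m v ≤ pvMd m u + 1
  hparent : ∀ v ∈ done ++ pend, 0 < pvMd m v → ∃ u ∈ done, pvMd m u + 1 = pvMd m v ∧ v ∈ pvNeighbors D u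
  hvals : ∀ v ∈ done ++ pend, v = src ∨ v ∈ pvAllVals D

def PvBfsGood (D : List (Int × List (Int × Int))) (src : Int)
    (ord : List Int) (m : PySem.Dict Int Int) : Prop := PvBfsInv D src ord [] m

-- the inner 'for v in D[u]' fold of B's phase 1, characterized
theorem pv_bfs_inner (D : List (Int × List (Int × Int))) (u : Int) (ns : List Int) :
    ∀ (rest : List Int) (m : PySem.Dict Int Int), m.keys.Nodup → u ∈ m.keys →
      (ns.foldl (pvBfsStep D u) (rest, m)).1 = rest ++ pvNew m.keys ns ∧
      (ns.foldl (pvBfsStep D u) (rest, m)).2.keys = m.keys ++ pvNew m.keys ns ∧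
      (∀ x ∈ m.keys, pvMd (ns.foldl (pvBfsStep D u) (rest, m)).2 x = pvMd m x) ∧
      (∀ x, x ∉ m.keys → x ∈ ns → pvMd (ns.foldl (pvBfsStep D u) (rest, m)).2 x = pvMd m u + 1) := by
  induction ns with
  | nil => intro rest m hnd hu; simp [pvNew]
  | cons v t ih =>
    intro rest m hnd hu
    by_cases hv : v ∈ m.keys
    · have hc : PySem.Dict.contains m v = true := (PySem.Dict.contains_iff_mem_keys m v).mpr hv
      have hstep : pvBfsStep D u (rest, m) v = (rest, m) := by simp [pvBfsStep, hc]
      have hnew : pvNew m.keys (v :: t) = pvNew m.keys t := by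
        rw [pvNew, if_pos ((PySem.Set.contains_iff m.keys v).mpr hv)]
      rw [List.foldl_cons, hstep, hnew]
      obtain ⟨h1, h2, h3, h4⟩ := ih rest m hnd hu
      exact ⟨h1, h2, h3, fun x hx hxt => h4 x hx (by
        rcases List.mem_cons.mp hxt with h | h
        · exact absurd (h ▸ hv) hx
        · exact h)⟩
    · have hc : PySem.Dict.contains m v = false := by
        rw [← Bool.not_eq_true, PySem.Dict.contains_iff_mem_keys]; exact hv
      have hstep : pvBfsStep D u (rest, m) v = (rest ++ [v], m.insert v (m.getD u 0 + 1)) := by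
        simp [pvBfsStep, hc]
      set m' := m.insert v (m.getD u 0 + 1) with hm'
      have hkeys' : m'.keys = m.keys ++ [v] := PySem.Dict.keys_insert_of_not_contains m _ hc
      have hnd' : m'.keys.Nodup := PySem.Dict.nodup_keys_insert m _ _ hnd
      have hu' : u ∈ m'.keys := by rw [hkeys']; exact List.mem_append_left _ hu
      have hadd : PySem.Set.add m.keys v = m.keys ++ [v] := by
        unfold PySem.Set.add
        rw [pv_contains_false m.keys v hv]
        simp
      have hnew : pvNew m.keys (v :: t) = v :: pvNew m'.keys t := by
        rw [pvNew, if_neg (by rw [pv_contains_false m.keys v hv]; simp),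
          hadd, ← hkeys']
      have hmd' : ∀ x ∈ m.keys, pvMd m' x = pvMd m x := by
        intro x hx
        have hxv : x ≠ v := fun he => hv (he ▸ hx)
        simp [pvMd, hm', PySem.Dict.getD_insert, hxv]
      have hmdv : pvMd m' v = pvMd m u + 1 := by
        simp [pvMd, hm', PySem.Dict.getD_insert]
      rw [List.foldl_cons, hstep]
      obtain ⟨h1, h2, h3, h4⟩ := ih (rest ++ [v]) m' hnd' hu'
      refine ⟨by rw [h1, hnew, List.append_assoc]; rfl,
        by rw [h2, hnew, hkeys', List.append_assoc]; rfl, ?_, ?_⟩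
      · intro x hx
        rw [h3 x (by rw [hkeys']; exact List.mem_append_left _ hx), hmd' x hx]
      · intro x hx hxt
        by_cases hxv : x = v
        · subst hxv
          rw [h3 x (by rw [hkeys']; exact List.mem_append_right _ (by simp)), hmdv]
        · have hxm' : x ∉ m'.keys := by
            rw [hkeys']
            simp only [List.mem_append, List.mem_singleton]
            rintro (h | h)
            · exact hx h
            · exact hxv h
          have hxt' : x ∈ t := by
            rcases List.mem_cons.mp hxt with h | h
            · exact absurd h hxv
            · exact h
          rw [h4 x hxm' hxt', hmd' u hu]


-- one iteration of B's phase-1 while-loop preserves the invariant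
theorem pv_bfs_step_inv (D : List (Int × List (Int × Int))) (src : Int)
    (done rest : List Int) (u : Int) (m : PySem.Dict Int Int)
    (h : PvBfsInv D src done (u :: rest) m) :
    PvBfsInv D src (done ++ [u])
      ((pvNeighbors D u).foldl (pvBfsStep D u) (rest, m)).1
      ((pvNeighbors D u).foldl (pvBfsStep D u) (rest, m)).2 := by
  obtain ⟨hkeys, hnodup, hsrcMem, hsrcZero, hnonneg, hzeroSrc, hsorted, hspan, hclosure,
    hparent, hvals⟩ := h
  have hndk : m.keys.Nodup := by rw [hkeys]; exact hnodup
  have humem : u ∈ done ++ u :: rest := by simp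
  have huk : u ∈ m.keys := by rw [hkeys]; exact humem
  obtain ⟨hp1, hp2, hp3, hp4⟩ := pv_bfs_inner D u (pvNeighbors D u) rest m hndk huk
  set ns := pvNeighbors D u with hns
  set news := pvNew m.keys ns with hnews
  set res := ns.foldl (pvBfsStep D u) (rest, m) with hres
  have hmemnews : ∀ x, x ∈ news ↔ x ∈ ns ∧ x ∉ m.keys := fun x => pv_mem_new m.keys ns x
  have hmdL : ∀ x ∈ done ++ u :: rest, pvMd res.2 x = pvMd m x := by
    intro x hx; exact hp3 x (by rw [hkeys]; exact hx)
  have hmdN : ∀ x ∈ news, pvMd res.2 x = pvMd m u + 1 := by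
    intro x hx
    obtain ⟨hx1, hx2⟩ := (hmemnews x).mp hx
    exact hp4 x hx2 hx1
  have hL' : (done ++ [u]) ++ (rest ++ news) = (done ++ u :: rest) ++ news := by simp
  obtain ⟨hsd, hsp, hcrossS⟩ := List.pairwise_append.mp hsorted
  have hup : ∀ p ∈ rest, pvMd m u ≤ pvMd m p := by
    intro p hp
    exact (List.pairwise_cons.mp hsp).1 p hp
  have hLbound : ∀ a ∈ done ++ u :: rest, pvMd m a ≤ pvMd m u + 1 := by
    intro a ha
    rcases List.mem_append.mp ha with ha | ha
    · have := hcrossS a ha u (by simp); omega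
    · rcases List.mem_cons.mp ha with ha | ha
      · subst ha; omega
      · exact hspan u (by simp) a (List.mem_cons_of_mem _ ha)
  have hnn_u : 0 ≤ pvMd m u := hnonneg u humem
  rw [hp1]
  constructor
  case hkeys => rw [hp2, hkeys]; exact hL'.symm
  case hnodup =>
    rw [hL']
    refine List.Nodup.append hnodup (pv_nodup_new m.keys ns) ?_
    intro x hx hx2
    exact ((hmemnews x).mp hx2).2 (by rw [hkeys]; exact hx)
  case hsrcMem =>
    rw [hL']; exact List.mem_append_left _ hsrcMem
  case hsrcZero => rw [hmdL src hsrcMem]; exact hsrcZero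
  case hnonneg =>
    intro v hv
    rw [hL'] at hv
    rcases List.mem_append.mp hv with hv | hv
    · rw [hmdL v hv]; exact hnonneg v hv
    · rw [hmdN v hv]; omega
  case hzeroSrc =>
    intro v hv hz
    rw [hL'] at hv
    rcases List.mem_append.mp hv with hv | hv
    · rw [hmdL v hv] at hz; exact hzeroSrc v hv hz
    · rw [hmdN v hv] at hz; omega
  case hsorted =>
    rw [hL', List.pairwise_append]
    refine ⟨?_, ?_, ?_⟩
    · refine List.Pairwise.imp_of_mem ?_ hsorted
      intro a b ha hb hab
      rw [hmdL a ha, hmdL b hb]; exact hab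
    · refine List.Pairwise.imp_of_mem ?_ (pv_nodup_new m.keys ns)
      intro a b ha hb _
      rw [hmdN a ha, hmdN b hb]
    · intro a ha b hb
      rw [hmdL a ha, hmdN b hb]
      exact hLbound a ha
  case hspan =>
    intro p hp q hq
    rcases List.mem_append.mp hp with hp' | hp' <;> rcases List.mem_append.mp hq with hq' | hq'
    · rw [hmdL p (by simp [hp']), hmdL q (by simp [hq'])]
      exact hspan p (List.mem_cons_of_mem _ hp') q (List.mem_cons_of_mem _ hq')
    · rw [hmdL p (by simp [hp']), hmdN q hq']
      have := hup p hp'; omega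
    · rw [hmdN p hp', hmdL q (by simp [hq'])]
      have := hspan u (by simp) q (List.mem_cons_of_mem _ hq'); omega
    · rw [hmdN p hp', hmdN q hq']; omega
  case hclosure =>
    intro u' hu' v hv
    rw [hL']
    rcases List.mem_append.mp hu' with hu'' | hu''
    · obtain ⟨hvm, hvb⟩ := hclosure u' hu'' v hv
      exact ⟨List.mem_append_left _ hvm,
        by rw [hmdL v hvm, hmdL u' (by simp [hu''])]; exact hvb⟩
    · have huu : u' = u := by simpa using hu''
      subst huu
      by_cases hvk : v ∈ m.keys
      · have hvL : v ∈ done ++ u' :: rest := by rw [← hkeys]; exact hvk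
        refine ⟨List.mem_append_left _ hvL, ?_⟩
        rw [hmdL v hvL, hmdL u' humem]
        exact hLbound v hvL
      · have hvn : v ∈ news := (hmemnews v).mpr ⟨hv, hvk⟩
        refine ⟨List.mem_append_right _ hvn, ?_⟩
        rw [hmdN v hvn, hmdL u' humem]
  case hparent =>
    intro v hv hvpos
    rw [hL'] at hv
    rcases List.mem_append.mp hv with hv' | hv'
    · rw [hmdL v hv'] at hvpos
      obtain ⟨w, hw, hwv, hwn⟩ := hparent v hv' hvpos
      refine ⟨w, List.mem_append_left _ hw, ?_, hwn⟩
      rw [hmdL w (List.mem_append_left _ hw), hmdL v hv']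
      exact hwv
    · refine ⟨u, by simp, ?_, ((hmemnews v).mp hv').1⟩
      rw [hmdL u humem, hmdN v hv']
  case hvals =>
    intro v hv
    rw [hL'] at hv
    rcases List.mem_append.mp hv with hv' | hv'
    · exact hvals v hv'
    · exact Or.inr (pv_mem_nbrs_val D u v ((hmemnews v).mp hv').1)


theorem pv_bfs_len (D : List (Int × List (Int × Int))) (src : Int)
    (done pend : List Int) (m : PySem.Dict Int Int) (h : PvBfsInv D src done pend m) :
    (done ++ pend).length ≤ 1 + (pvAllVals D).length := by
  have h1 : (done ++ pend).toFinset.card = (done ++ pend).length :=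
    List.toFinset_card_of_nodup h.hnodup
  have h2 : (done ++ pend).toFinset ⊆ (src :: pvAllVals D).toFinset := by
    intro x hx
    rw [List.mem_toFinset] at hx ⊢
    rcases h.hvals x hx with h' | h'
    · simp [h']
    · exact List.mem_cons_of_mem _ h'
  have h3 := Finset.card_le_card h2
  have h4 := List.toFinset_card_le (src :: pvAllVals D)
  simp only [List.length_cons] at h4
  omega

theorem pv_allVals_len (D : List (Int × List (Int × Int))) :
    (pvAllVals D).length = (D.map (fun p => p.2.length)).sum := by
  simp [pvAllVals, List.length_flatMap]

theorem pv_bfs_run (D : List (Int × List (Int × Int))) (src : Int) :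
    ∀ (fuel : Nat) (done pend : List Int) (m : PySem.Dict Int Int),
      PvBfsInv D src done pend m →
      1 + (pvAllVals D).length ≤ fuel + done.length →
      PvBfsGood D src (pvBfsLoop D fuel done pend m).1 (pvBfsLoop D fuel done pend m).2 := by
  intro fuel
  induction fuel with
  | zero =>
    intro done pend m h hf
    have hlen := pv_bfs_len D src done pend m h
    have hpe : pend = [] := by
      have := List.length_append (as := done) (bs := pend)
      have : pend.length = 0 := by
        rw [List.length_append] at hlen
        omega
      exact List.eq_nil_of_length_eq_zero this
    subst hpe
    exact h
  | succ fuel ih =>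
    intro done pend m h hf
    cases pend with
    | nil => exact h
    | cons u rest =>
      show PvBfsGood D src
        (pvBfsLoop D fuel (done ++ [u])
          ((pvNeighbors D u).foldl (pvBfsStep D u) (rest, m)).1
          ((pvNeighbors D u).foldl (pvBfsStep D u) (rest, m)).2).1 _
      exact ih (done ++ [u]) _ _ (pv_bfs_step_inv D src done rest u m h)
        (by rw [List.length_append]; simp; omega)

theorem pv_bfs_init (D : List (Int × List (Int × Int))) (src : Int) :
    PvBfsInv D src [] [src] (PySem.Dict.ofList [(src, 0)]) := by
  have hm : PySem.Dict.ofList [(src, (0 : Int))] = PySem.Dict.empty.insert src 0 := rfl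
  have hk : (PySem.Dict.ofList [(src, (0 : Int))]).keys = [src] := by
    rw [hm]
    rw [PySem.Dict.keys_insert_of_not_contains _ _ (PySem.Dict.contains_empty src)]
    simp [PySem.Dict.keys_empty]
  have hg : pvMd (PySem.Dict.ofList [(src, (0 : Int))]) src = 0 := by
    rw [hm]; simp [pvMd, PySem.Dict.getD_insert]
  constructor
  case hkeys => simpa using hk
  case hnodup => simp
  case hsrcMem => simp
  case hsrcZero => exact hg
  case hnonneg => intro v hv; simp at hv; subst hv; rw [hg]
  case hzeroSrc => intro v hv _; simpa using hv
  case hsorted => simp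
  case hspan =>
    intro p hp q hq
    simp at hp hq; subst hp; subst hq
    rw [hg]; omega
  case hclosure => intro u hu; simp at hu
  case hparent =>
    intro v hv hpos
    simp at hv; subst hv
    rw [hg] at hpos; omega
  case hvals => intro v hv; simp at hv; exact Or.inl hv

def pvRun (source_node : Int) (D : List (Int × List (Int × Int))) :
    List Int × PySem.Dict Int Int :=
  pvBfsLoop D (pvFuel D) [] [source_node] (PySem.Dict.ofList [(source_node, 0)])

theorem pv_bfs_good (source_node : Int) (D : List (Int × List (Int × Int))) :
    PvBfsGood D source_node (pvRun source_node D).1 (pvRun source_node D).2 := by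
  refine pv_bfs_run D source_node (pvFuel D) [] [source_node] _ (pv_bfs_init D source_node) ?_
  rw [pv_allVals_len]
  simp [pvFuel]


-- ===== distance levels and the three canonical counts =====

def pvLvl (m : PySem.Dict Int Int) (ord : List Int) (i : Int) : List Int :=
  ord.filter (fun v => pvMd m v == i)

def pvCntN (m : PySem.Dict Int Int) (ord : List Int) (i : Int) : Nat :=
  (pvLvl m ord (i + 1)).length

def pvCntE (D : List (Int × List (Int × Int))) (m : PySem.Dict Int Int) (ord : List Int) (i : Int) : Nat :=
  (pvPairs D ord).countP (fun p => (pvMd m p.1 == i) && pvEdgeOK D m p.1 p.2)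

def pvCntS (D : List (Int × List (Int × Int))) (m : PySem.Dict Int Int) (ord : List Int) (i : Int) : Nat :=
  (pvPairs D ord).countP (fun p => (pvMd m p.1 == i) && pvStubOK D m p.1 p.2)

def pvDepth (m : PySem.Dict Int Int) : Int :=
  (PySem.List.max? m.values (fun x => x)).getD 0

theorem pv_mem_pairs (D : List (Int × List (Int × Int))) (Q : List Int) (p : Int × Int) :
    p ∈ pvPairs D Q ↔ p.1 ∈ Q ∧ p.2 ∈ pvNeighbors D p.1 := by
  unfold pvPairs
  rw [List.mem_flatMap]
  constructor
  · rintro ⟨u, hu, hp⟩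
    rw [List.mem_map] at hp
    obtain ⟨v, hv, rfl⟩ := hp
    exact ⟨hu, hv⟩
  · rintro ⟨h1, h2⟩
    exact ⟨p.1, h1, List.mem_map.mpr ⟨p.2, h2, Prod.mk.eta⟩⟩

theorem pv_nodup_nbrs (D : List (Int × List (Int × Int))) (u : Int) :
    (pvNeighbors D u).Nodup := PySem.Dict.nodup_keys_ofList _

theorem pv_nodup_pairs (D : List (Int × List (Int × Int))) (Q : List Int) (h : Q.Nodup) :
    (pvPairs D Q).Nodup := by
  unfold pvPairs
  induction Q with
  | nil => simp
  | cons u t ih =>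
    rw [List.flatMap_cons]
    refine List.Nodup.append ?_ (ih h.of_cons) ?_
    · exact (pv_nodup_nbrs D u).map (fun a b hab => by simpa using hab)
    · intro p hp1 hp2
      rw [List.mem_map] at hp1
      obtain ⟨v, _, rfl⟩ := hp1
      rw [List.mem_flatMap] at hp2
      obtain ⟨w, hw, hp⟩ := hp2
      rw [List.mem_map] at hp
      obtain ⟨x, _, hx⟩ := hp
      have : w = u := (Prod.mk.injEq _ _ _ _ |>.mp hx).1.symm ▸ rfl
      have hwu : w = u := by
        have := congrArg Prod.fst hx
        simpa using this
      exact (List.nodup_cons.mp h).1 (hwu ▸ hw)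

theorem pv_edge_eq (p q : Int × Int) :
    pvEdge p = pvEdge q ↔ (p = q ∨ (p.1 = q.2 ∧ p.2 = q.1)) := by
  rcases p with ⟨a, b⟩
  rcases q with ⟨c, d⟩
  simp only [pvEdge, Prod.mk.injEq, min_def, max_def]
  split_ifs <;> constructor <;> intro h <;> rcases h with h | h <;>
    first
      | (refine Or.inl ?_; omega)
      | (refine Or.inr ?_; omega)
      | omega

theorem pv_edgeOK_iff (D : List (Int × List (Int × Int))) (m : PySem.Dict Int Int) (u v : Int) :
    pvEdgeOK D m u v = true ↔
      (u = v ∨ u ∉ pvNeighbors D v ∨ pvMd m u < pvMd m v ∨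
        (pvMd m u = pvMd m v ∧ u < v)) := by
  simp only [pvEdgeOK, pvMd, Bool.or_eq_true, Bool.and_eq_true, decide_eq_true_eq,
    beq_iff_eq, Bool.not_eq_true', ← Bool.not_eq_true, PySem.Set.contains_iff]
  tauto

theorem pv_stubOK_iff (D : List (Int × List (Int × Int))) (m : PySem.Dict Int Int) (u v : Int) :
    pvStubOK D m u v = true ↔ ¬(u ∈ pvNeighbors D v ∧ pvMd m v < pvMd m u) := by
  rw [pvStubOK]
  rw [Bool.not_eq_true']
  constructor
  · intro h hc
    obtain ⟨h1, h2⟩ := hc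
    rw [(PySem.Set.contains_iff _ _).mpr h1] at h
    simp at h
    simp only [pvMd] at h2
    omega
  · intro h
    by_cases hc : u ∈ pvNeighbors D v
    · rw [(PySem.Set.contains_iff _ _).mpr hc]
      simp [pvMd] at h ⊢
      have := h hc
      omega
    · rw [pv_contains_false _ _ hc]
      rfl

-- values of the final dist dict are exactly the labels of ord
theorem pv_values_eq (D : List (Int × List (Int × Int))) (src : Int)
    (ord : List Int) (m : PySem.Dict Int Int) (hG : PvBfsGood D src ord m) :
    m.values = ord.map (pvMd m) := by
  have hk : m.keys = ord := by simpa using hG.hkeys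
  have hnd : m.keys.Nodup := by rw [hk]; simpa using hG.hnodup
  have := PySem.Dict.values_eq_map_keys m hnd 0
  rw [this, hk]
  rfl

theorem pv_depth_spec (D : List (Int × List (Int × Int))) (src : Int)
    (ord : List Int) (m : PySem.Dict Int Int) (hG : PvBfsGood D src ord m) :
    (∀ v ∈ ord, pvMd m v ≤ pvDepth m) ∧ (∃ v ∈ ord, pvMd m v = pvDepth m) ∧ 0 ≤ pvDepth m := by
  have hvals := pv_values_eq D src ord m hG
  have hsrc : src ∈ ord := by simpa using hG.hsrcMem
  cases hord : ord with
  | nil => rw [hord] at hsrc; simp at hsrc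
  | cons a t =>
    rw [hord] at hsrc
    have hv : m.values = pvMd m a :: t.map (pvMd m) := by rw [hvals, hord]; rfl
    obtain ⟨x, hx, hxm, hxall⟩ := pv_max?_spec (pvMd m a) (t.map (pvMd m))
    have hd : pvDepth m = x := by rw [pvDepth, hv, hx]; rfl
    have hall : ∀ v ∈ a :: t, pvMd m v ≤ x := by
      intro v hvm
      rcases List.mem_cons.mp hvm with h | h
      · exact h ▸ hxall _ (List.mem_cons_self)
      · exact hxall _ (List.mem_cons_of_mem _ (List.mem_map.mpr ⟨v, h, rfl⟩))
    refine ⟨?_, ?_, ?_⟩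
    · intro v hvm
      rw [hd]
      exact hall v hvm
    · rw [hd]
      rcases List.mem_cons.mp hxm with h | h
      · exact ⟨a, List.mem_cons_self, h.symm⟩
      · obtain ⟨v, hv', hveq⟩ := List.mem_map.mp h
        exact ⟨v, List.mem_cons_of_mem _ hv', hveq⟩
    · rw [hd]
      have := hall src hsrc
      have h0 : pvMd m src = 0 := hG.hsrcZero
      omega

theorem pv_exists_at (D : List (Int × List (Int × Int))) (src : Int)
    (ord : List Int) (m : PySem.Dict Int Int) (hG : PvBfsGood D src ord m) :
    ∀ (k : Nat) (v : Int), v ∈ ord → pvMd m v = (k : Int) →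
      ∀ j : Nat, j ≤ k → ∃ x ∈ ord, pvMd m x = (j : Int) := by
  intro k
  induction k with
  | zero =>
    intro v hv hk j hj
    interval_cases j
    exact ⟨v, hv, hk⟩
  | succ k ih =>
    intro v hv hk j hj
    by_cases hjk : j = k + 1
    · exact ⟨v, hv, by rw [hjk]; exact hk⟩
    · have hpos : 0 < pvMd m v := by rw [hk]; positivity
      obtain ⟨u, hu, huv, _⟩ := hG.hparent v (by simpa using hv) hpos
      have humem : u ∈ ord := by simpa using hu
      have huk : pvMd m u = (k : Int) := by rw [hk] at huv; push_cast at huv ⊢; omega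
      exact ih u humem huk j (by omega)

theorem pv_levels_chain (D : List (Int × List (Int × Int))) (src : Int)
    (ord : List Int) (m : PySem.Dict Int Int) (hG : PvBfsGood D src ord m) :
    ∀ (k : Nat), (∃ v ∈ ord, pvMd m v = (k : Int)) →
      ∃ l : List Int, l.Nodup ∧ l.length = k + 1 ∧ (∀ x ∈ l, x ∈ ord) ∧
        (∀ x ∈ l, pvMd m x ≤ (k : Int)) := by
  intro k
  induction k with
  | zero =>
    rintro ⟨v, hv, hvk⟩
    exact ⟨[v], by simp, by simp, by simpa using hv, by simp [hvk]⟩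
  | succ k ih =>
    rintro ⟨v, hv, hvk⟩
    obtain ⟨l, hnd, hlen, hmem, hbound⟩ := ih (pv_exists_at D src ord m hG (k+1) v hv hvk k (by omega))
    refine ⟨v :: l, ?_, by simp [hlen], ?_, ?_⟩
    · rw [List.nodup_cons]
      refine ⟨fun hvl => ?_, hnd⟩
      have := hbound v hvl
      rw [hvk] at this
      push_cast at this
      omega
    · intro x hx
      rcases List.mem_cons.mp hx with h | h
      · exact h ▸ hv
      · exact hmem x h
    · intro x hx
      rcases List.mem_cons.mp hx with h | h
      · rw [h, hvk]
      · have := hbound x h; push_cast; omega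

theorem pv_nodup_sub_len (l l' : List Int) (hnd : l.Nodup) (hsub : ∀ x ∈ l, x ∈ l') :
    l.length ≤ l'.length := by
  have h1 : l.toFinset.card = l.length := List.toFinset_card_of_nodup hnd
  have h2 : l.toFinset ⊆ l'.toFinset := by
    intro x hx
    rw [List.mem_toFinset] at hx ⊢
    exact hsub x hx
  have h3 := Finset.card_le_card h2
  have h4 := List.toFinset_card_le l'
  omega

theorem pv_depth_le (D : List (Int × List (Int × Int))) (src : Int)
    (ord : List Int) (m : PySem.Dict Int Int) (hG : PvBfsGood D src ord m) :
    (pvDepth m).toNat + 1 ≤ ord.length := by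
  obtain ⟨_, ⟨v, hv, hvd⟩, hd0⟩ := pv_depth_spec D src ord m hG
  obtain ⟨l, hnd, hlen, hmem, _⟩ := pv_levels_chain D src ord m hG (pvDepth m).toNat
    ⟨v, hv, by rw [hvd]; exact (Int.toNat_of_nonneg hd0).symm⟩
  have := pv_nodup_sub_len l ord hnd hmem
  omega


-- ===== A-side: invariant of A's level loop, stated against B's distance labels =====

structure PvAInv (D : List (Int × List (Int × Int))) (ord : List Int)
    (m : PySem.Dict Int Int) (i : Int) (Q : List Int)
    (vn : PySem.Set Int) (ve vs : PySem.Set (Int × Int)) : Prop where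
  hQnd : Q.Nodup
  hQ : ∀ v, v ∈ Q ↔ v ∈ ord ∧ pvMd m v = i
  hvn : ∀ v, v ∈ vn ↔ v ∈ ord ∧ pvMd m v ≤ i
  hve : ∀ e, e ∈ ve ↔ ∃ q : Int × Int, q.1 ∈ ord ∧ pvMd m q.1 < i ∧
      q.2 ∈ pvNeighbors D q.1 ∧ e = pvEdge q
  hvs : ∀ p : Int × Int, p ∈ vs ↔
      (p.1 ∈ ord ∧ pvMd m p.1 < i ∧ p.2 ∈ pvNeighbors D p.1) ∨
      (p.2 ∈ ord ∧ pvMd m p.2 < i ∧ p.1 ∈ pvNeighbors D p.2)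

theorem pv_ord_nodup {D : List (Int × List (Int × Int))} {src : Int} {ord : List Int}
    {m : PySem.Dict Int Int} (hG : PvBfsGood D src ord m) : ord.Nodup := by
  simpa using hG.hnodup

theorem pv_closure' {D : List (Int × List (Int × Int))} {src : Int} {ord : List Int}
    {m : PySem.Dict Int Int} (hG : PvBfsGood D src ord m) :
    ∀ u ∈ ord, ∀ v ∈ pvNeighbors D u, v ∈ ord ∧ pvMd m v ≤ pvMd m u + 1 := by
  intro u hu v hv
  have := hG.hclosure u (by simpa using hu) v hv
  simpa using this

theorem pv_parent' {D : List (Int × List (Int × Int))} {src : Int} {ord : List Int}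
    {m : PySem.Dict Int Int} (hG : PvBfsGood D src ord m) :
    ∀ v ∈ ord, 0 < pvMd m v → ∃ u, u ∈ ord ∧ pvMd m u + 1 = pvMd m v ∧ v ∈ pvNeighbors D u := by
  intro v hv hpos
  obtain ⟨u, hu, h1, h2⟩ := hG.hparent v (by simpa using hv) hpos
  exact ⟨u, by simpa using hu, h1, h2⟩

theorem pv_mem_ns (D : List (Int × List (Int × Int))) (Q : List Int) (v : Int) :
    v ∈ (pvPairs D Q).map Prod.snd ↔ ∃ u ∈ Q, v ∈ pvNeighbors D u := by
  rw [List.mem_map]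
  constructor
  · rintro ⟨p, hp, rfl⟩
    obtain ⟨h1, h2⟩ := (pv_mem_pairs D Q p).mp hp
    exact ⟨p.1, h1, h2⟩
  · rintro ⟨u, hu, hv⟩
    exact ⟨(u, v), (pv_mem_pairs D Q (u, v)).mpr ⟨hu, hv⟩, rfl⟩

theorem pv_frontier_char {D : List (Int × List (Int × Int))} {src : Int} {ord : List Int}
    {m : PySem.Dict Int Int} {i : Int} {Q : List Int} {vn : PySem.Set Int}
    {ve vs : PySem.Set (Int × Int)}
    (hG : PvBfsGood D src ord m) (hi : 0 ≤ i) (hA : PvAInv D ord m i Q vn ve vs) :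
    ∀ v, v ∈ pvNew vn ((pvPairs D Q).map Prod.snd) ↔ (v ∈ ord ∧ pvMd m v = i + 1) := by
  intro v
  rw [pv_mem_new, pv_mem_ns]
  constructor
  · rintro ⟨⟨u, hu, hv⟩, hnvn⟩
    obtain ⟨huo, hui⟩ := (hA.hQ u).mp hu
    obtain ⟨hvo, hvb⟩ := pv_closure' hG u huo v hv
    refine ⟨hvo, ?_⟩
    have : ¬ (v ∈ ord ∧ pvMd m v ≤ i) := fun hc => hnvn ((hA.hvn v).mpr hc)
    rw [hui] at hvb
    by_contra hne
    exact this ⟨hvo, by omega⟩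
  · rintro ⟨hvo, hvi⟩
    have hpos : 0 < pvMd m v := by omega
    obtain ⟨u, huo, hui, hv⟩ := pv_parent' hG v hvo hpos
    refine ⟨⟨u, (hA.hQ u).mpr ⟨huo, by omega⟩, hv⟩, fun hc => ?_⟩
    obtain ⟨_, hle⟩ := (hA.hvn v).mp hc
    omega

theorem pv_cntN_eq {D : List (Int × List (Int × Int))} {src : Int} {ord : List Int}
    {m : PySem.Dict Int Int} {i : Int} {Q : List Int} {vn : PySem.Set Int}
    {ve vs : PySem.Set (Int × Int)}
    (hG : PvBfsGood D src ord m) (hi : 0 ≤ i) (hA : PvAInv D ord m i Q vn ve vs) :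
    (pvNew vn ((pvPairs D Q).map Prod.snd)).length = pvCntN m ord i := by
  rw [pvCntN, pvLvl]
  have hperm : (pvNew vn ((pvPairs D Q).map Prod.snd)).Perm
      (ord.filter (fun v => pvMd m v == i + 1)) := by
    rw [List.perm_ext_iff_of_nodup (pv_nodup_new _ _) ((pv_ord_nodup hG).filter _)]
    intro v
    rw [List.mem_filter, beq_iff_eq]
    exact pv_frontier_char hG hi hA v
  exact hperm.length_eq

theorem pv_countP_filter_pairs (D : List (Int × List (Int × Int))) (m : PySem.Dict Int Int)
    (i : Int) (pr : Int × Int → Bool) :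
    ∀ l : List Int,
      (pvPairs D (l.filter (fun v => pvMd m v == i))).countP pr
        = (pvPairs D l).countP (fun p => (pvMd m p.1 == i) && pr p) := by
  intro l
  induction l with
  | nil => rfl
  | cons u t ih =>
    rw [List.filter_cons]
    by_cases h : pvMd m u = i
    · rw [if_pos (by simpa using h)]
      unfold pvPairs at *
      rw [List.flatMap_cons, List.flatMap_cons, List.countP_append, List.countP_append, ih,
        List.countP_map, List.countP_map]
      congr 1
      refine List.countP_congr ?_
      intro v _
      simp [h]
    · rw [if_neg (by simpa using h)]
      unfold pvPairs at *
      rw [List.flatMap_cons, List.countP_append, ih, List.countP_map]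
      have : ((fun p => (pvMd m p.1 == i) && pr p) ∘ fun v => (u, v)) = fun _ => false := by
        funext v
        simp [h]
      rw [this]
      simp

theorem pv_countP_lvl {D : List (Int × List (Int × Int))} {ord : List Int}
    {m : PySem.Dict Int Int} {i : Int} {Q : List Int}
    (hond : ord.Nodup) (hQnd : Q.Nodup) (hQ : ∀ v, v ∈ Q ↔ v ∈ ord ∧ pvMd m v = i)
    (pr : Int × Int → Bool) :
    (pvPairs D Q).countP pr = (pvPairs D ord).countP (fun p => (pvMd m p.1 == i) && pr p) := by
  have hperm : Q.Perm (ord.filter (fun v => pvMd m v == i)) := by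
    rw [List.perm_ext_iff_of_nodup hQnd (hond.filter _)]
    intro v
    rw [List.mem_filter, beq_iff_eq]
    exact hQ v
  have hpp : (pvPairs D Q).Perm (pvPairs D (ord.filter (fun v => pvMd m v == i))) := by
    unfold pvPairs
    exact hperm.flatMap (fun a _ => List.Perm.refl _)
  rw [hpp.countP_eq, pv_countP_filter_pairs]

theorem pv_ps_facts {D : List (Int × List (Int × Int))} {src : Int} {ord : List Int}
    {m : PySem.Dict Int Int} {i : Int} {Q : List Int} {vn : PySem.Set Int}
    {ve vs : PySem.Set (Int × Int)}
    (hG : PvBfsGood D src ord m) (hA : PvAInv D ord m i Q vn ve vs) :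
    ∀ p ∈ pvPairs D Q, p.1 ∈ ord ∧ pvMd m p.1 = i ∧ p.2 ∈ pvNeighbors D p.1 ∧ p.2 ∈ ord := by
  intro p hp
  obtain ⟨h1, h2⟩ := (pv_mem_pairs D Q p).mp hp
  obtain ⟨ho, hm⟩ := (hA.hQ p.1).mp h1
  exact ⟨ho, hm, h2, (pv_closure' hG p.1 ho p.2 h2).1⟩

theorem pv_cntS_eq {D : List (Int × List (Int × Int))} {src : Int} {ord : List Int}
    {m : PySem.Dict Int Int} {i : Int} {Q : List Int} {vn : PySem.Set Int}
    {ve vs : PySem.Set (Int × Int)}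
    (hG : PvBfsGood D src ord m) (hA : PvAInv D ord m i Q vn ve vs) :
    (pvNew vs (pvPairs D Q)).length = pvCntS D m ord i := by
  rw [pv_new_eq_filter vs (pvPairs D Q) (pv_nodup_pairs D Q hA.hQnd),
    ← List.countP_eq_length_filter]
  rw [pvCntS, ← pv_countP_lvl (pv_ord_nodup hG) hA.hQnd hA.hQ]
  refine List.countP_congr ?_
  intro p hp
  obtain ⟨ho, hm, hn, ho2⟩ := pv_ps_facts hG hA p hp
  rw [Bool.not_eq_true', ← Bool.not_eq_true, PySem.Set.contains_iff, pv_stubOK_iff]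
  rw [hA.hvs p]
  constructor
  · intro h hc
    exact h (Or.inr ⟨ho2, by rw [hm] at hc; exact hc.2, hc.1⟩)
  · rintro h (⟨_, hlt, _⟩ | ⟨_, hlt, hmem⟩)
    · omega
    · exact h ⟨hmem, by rw [hm]; exact hlt⟩


-- per level, qualifying arcs are in bijection (via pvEdge) with newly traversed edges
theorem pv_edge_swap' (p : Int × Int) : pvEdge (p.2, p.1) = pvEdge p := by
  rcases p with ⟨a, b⟩
  simp [pvEdge, min_comm, max_comm]

theorem pv_cntE_eq {D : List (Int × List (Int × Int))} {src : Int} {ord : List Int}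
    {m : PySem.Dict Int Int} {i : Int} {Q : List Int} {vn : PySem.Set Int}
    {ve vs : PySem.Set (Int × Int)}
    (hG : PvBfsGood D src ord m) (hA : PvAInv D ord m i Q vn ve vs) :
    (pvNew ve ((pvPairs D Q).map pvEdge)).length = pvCntE D m ord i := by
  set ps := pvPairs D Q with hps
  set T := ps.filter (fun p => pvEdgeOK D m p.1 p.2) with hT
  have hfacts := pv_ps_facts hG hA
  have hTmem : ∀ p, p ∈ T ↔ p ∈ ps ∧ pvEdgeOK D m p.1 p.2 = true := by
    intro p
    rw [hT, List.mem_filter]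
  have h1 : pvCntE D m ord i = T.length := by
    rw [hT, ← List.countP_eq_length_filter]
    exact (pv_countP_lvl (pv_ord_nodup hG) hA.hQnd hA.hQ
      (fun p => pvEdgeOK D m p.1 p.2)).symm
  have hinj : ∀ p ∈ T, ∀ q ∈ T, pvEdge p = pvEdge q → p = q := by
    intro p hp q hq heq
    obtain ⟨hpps, hpok⟩ := (hTmem p).mp hp
    obtain ⟨hqps, hqok⟩ := (hTmem q).mp hq
    rcases (pv_edge_eq p q).mp heq with h | ⟨h1', h2'⟩
    · exact h
    · obtain ⟨hpo, hpm, hpn, hpo2⟩ := hfacts p hpps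
      obtain ⟨hqo, hqm, hqn, hqo2⟩ := hfacts q hqps
      by_cases hpe : p.1 = p.2
      · exact Prod.ext_iff.mpr ⟨by omega, by omega⟩
      · exfalso
        rw [pv_edgeOK_iff] at hpok hqok
        have e2 : q.1 = p.2 := h2'.symm
        have e3 : q.2 = p.1 := h1'.symm
        have e1 : pvMd m p.2 = i := by rw [h2']; exact hqm
        have e4 : pvMd m q.2 = i := by rw [e3]; exact hpm
        rcases hpok with h | h | h | h
        · exact hpe h
        · refine h ?_
          rw [← e3, ← e2]
          exact hqn
        · omega
        · rcases hqok with h' | h' | h' | h'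
          · omega
          · refine h' ?_
            rw [e2, e3]
            exact hpn
          · omega
          · omega
  have hTnd : T.Nodup := (pv_nodup_pairs D Q hA.hQnd).filter _
  have hmapnd : (T.map pvEdge).Nodup := List.Nodup.map_on hinj hTnd
  have hmem : ∀ e, e ∈ T.map pvEdge ↔ e ∈ pvNew ve (ps.map pvEdge) := by
    intro e
    rw [pv_mem_new]
    constructor
    · intro he
      obtain ⟨p, hpT, rfl⟩ := List.mem_map.mp he
      obtain ⟨hpps, hpok⟩ := (hTmem p).mp hpT
      obtain ⟨hpo, hpm, hpn, hpo2⟩ := hfacts p hpps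
      refine ⟨List.mem_map.mpr ⟨p, hpps, rfl⟩, fun hc => ?_⟩
      obtain ⟨q, hqo, hqlt, hqn, hqe⟩ := (hA.hve _).mp hc
      rw [pv_edgeOK_iff] at hpok
      rcases (pv_edge_eq p q).mp hqe with h | ⟨h1', h2'⟩
      · rw [h] at hpm; omega
      · have hmem2 : p.1 ∈ pvNeighbors D p.2 := by rw [h1', h2']; exact hqn
        have hlt2 : pvMd m p.2 < i := by rw [h2']; exact hqlt
        rcases hpok with h' | h' | h' | h'
        · rw [h'] at hpm; omega
        · exact h' hmem2
        · omega
        · omega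
    · rintro ⟨hes, hnve⟩
      obtain ⟨p, hpps, rfl⟩ := List.mem_map.mp hes
      obtain ⟨hpo, hpm, hpn, hpo2⟩ := hfacts p hpps
      by_cases hok : pvEdgeOK D m p.1 p.2 = true
      · exact List.mem_map.mpr ⟨p, (hTmem p).mpr ⟨hpps, hok⟩, rfl⟩
      · rw [pv_edgeOK_iff] at hok
        push_neg at hok
        obtain ⟨hne, hrev, hnlt, hneq⟩ := hok
        by_cases hlt : pvMd m p.2 < i
        · exact absurd ((hA.hve (pvEdge p)).mpr
            ⟨(p.2, p.1), hpo2, hlt, hrev, (pv_edge_swap' p).symm⟩) hnve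
        · have hclo := (pv_closure' hG p.1 hpo p.2 hpn).2
          have hmd2 : pvMd m p.2 = i := by omega
          have hqps : (p.2, p.1) ∈ ps := (pv_mem_pairs D Q _).mpr
            ⟨(hA.hQ p.2).mpr ⟨hpo2, hmd2⟩, hrev⟩
          have hq21 : p.2 < p.1 := by
            have := hneq (by omega)
            omega
          have hqok : pvEdgeOK D m p.2 p.1 = true := by
            rw [pv_edgeOK_iff]
            exact Or.inr (Or.inr (Or.inr ⟨by omega, hq21⟩))
          exact List.mem_map.mpr ⟨(p.2, p.1), (hTmem _).mpr ⟨hqps, hqok⟩, pv_edge_swap' p⟩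
  have hperm : (T.map pvEdge).Perm (pvNew ve (ps.map pvEdge)) :=
    (List.perm_ext_iff_of_nodup hmapnd (pv_nodup_new _ _)).mpr hmem
  rw [h1, ← hperm.length_eq, List.length_map]


-- advancing A's visited sets by one level preserves the invariant
theorem pv_AInv_step {D : List (Int × List (Int × Int))} {src : Int} {ord : List Int}
    {m : PySem.Dict Int Int} {i : Int} {Q : List Int} {vn : PySem.Set Int}
    {ve vs : PySem.Set (Int × Int)}
    (hG : PvBfsGood D src ord m) (hi : 0 ≤ i) (hA : PvAInv D ord m i Q vn ve vs) :
    PvAInv D ord m (i + 1) (pvNew vn ((pvPairs D Q).map Prod.snd))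
      (PySem.Set.update vn ((pvPairs D Q).map Prod.snd))
      (PySem.Set.update ve ((pvPairs D Q).map pvEdge))
      ((PySem.Set.ofList (pvPairs D Q)).foldl (fun s p => PySem.Set.add s (p.2, p.1))
        (PySem.Set.update vs (pvPairs D Q))) := by
  set ps := pvPairs D Q with hps
  have hfacts := pv_ps_facts hG hA
  have hmem_ps : ∀ p : Int × Int, p ∈ ps ↔ p.1 ∈ ord ∧ pvMd m p.1 = i ∧ p.2 ∈ pvNeighbors D p.1 := by
    intro p
    rw [hps, pv_mem_pairs]
    constructor
    · rintro ⟨h1, h2⟩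
      obtain ⟨ho, hm⟩ := (hA.hQ p.1).mp h1
      exact ⟨ho, hm, h2⟩
    · rintro ⟨h1, h2, h3⟩
      exact ⟨(hA.hQ p.1).mpr ⟨h1, h2⟩, h3⟩
  constructor
  case hQnd => exact pv_nodup_new _ _
  case hQ => exact pv_frontier_char hG hi hA
  case hvn =>
    intro v
    rw [PySem.Set.mem_update]
    constructor
    · rintro (h | h)
      · obtain ⟨ho, hle⟩ := (hA.hvn v).mp h
        exact ⟨ho, by omega⟩
      · obtain ⟨u, hu, hv⟩ := (pv_mem_ns D Q v).mp h
        obtain ⟨huo, hum⟩ := (hA.hQ u).mp hu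
        obtain ⟨hvo, hvb⟩ := pv_closure' hG u huo v hv
        exact ⟨hvo, by omega⟩
    · rintro ⟨ho, hle⟩
      by_cases h : pvMd m v ≤ i
      · exact Or.inl ((hA.hvn v).mpr ⟨ho, h⟩)
      · have : v ∈ pvNew vn ((pvPairs D Q).map Prod.snd) :=
          (pv_frontier_char hG hi hA v).mpr ⟨ho, by omega⟩
        exact Or.inr ((pv_mem_new _ _ v).mp this).1
  case hve =>
    intro e
    rw [PySem.Set.mem_update]
    constructor
    · rintro (h | h)
      · obtain ⟨q, h1, h2, h3, h4⟩ := (hA.hve e).mp h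
        exact ⟨q, h1, by omega, h3, h4⟩
      · obtain ⟨p, hp, rfl⟩ := List.mem_map.mp h
        obtain ⟨h1, h2, h3⟩ := (hmem_ps p).mp hp
        exact ⟨p, h1, by omega, h3, rfl⟩
    · rintro ⟨q, h1, h2, h3, h4⟩
      by_cases h : pvMd m q.1 < i
      · exact Or.inl ((hA.hve e).mpr ⟨q, h1, h, h3, h4⟩)
      · have hq : q ∈ ps := (hmem_ps q).mpr ⟨h1, by omega, h3⟩
        exact Or.inr (List.mem_map.mpr ⟨q, hq, h4.symm⟩)
  case hvs =>
    intro p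
    rw [← PySem.Set.update_map_eq_foldl_add, PySem.Set.mem_update, PySem.Set.mem_update]
    have hswap : p ∈ (PySem.Set.ofList ps).map (fun q => (q.2, q.1)) ↔ (p.2, p.1) ∈ ps := by
      rw [List.mem_map]
      constructor
      · rintro ⟨q, hq, rfl⟩
        simpa using (PySem.Set.mem_ofList ps _).mp hq
      · intro h
        exact ⟨(p.2, p.1), (PySem.Set.mem_ofList ps _).mpr h, Prod.mk.eta⟩
    rw [hswap]
    constructor
    · rintro ((h | h) | h)
      · rcases (hA.hvs p).mp h with ⟨h1, h2, h3⟩ | ⟨h1, h2, h3⟩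
        · exact Or.inl ⟨h1, by omega, h3⟩
        · exact Or.inr ⟨h1, by omega, h3⟩
      · obtain ⟨h1, h2, h3⟩ := (hmem_ps p).mp h
        exact Or.inl ⟨h1, by omega, h3⟩
      · obtain ⟨h1, h2, h3⟩ := (hmem_ps (p.2, p.1)).mp h
        dsimp only at h2
        exact Or.inr ⟨h1, by omega, h3⟩
    · rintro (⟨h1, h2, h3⟩ | ⟨h1, h2, h3⟩)
      · by_cases h : pvMd m p.1 < i
        · exact Or.inl (Or.inl ((hA.hvs p).mpr (Or.inl ⟨h1, h, h3⟩)))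
        · exact Or.inl (Or.inr ((hmem_ps p).mpr ⟨h1, by omega, h3⟩))
      · by_cases h : pvMd m p.2 < i
        · exact Or.inl (Or.inl ((hA.hvs p).mpr (Or.inr ⟨h1, h, h3⟩)))
        · exact Or.inr ((hmem_ps (p.2, p.1)).mpr ⟨h1, by dsimp only; omega, h3⟩)


theorem pv_Q_nonempty {D : List (Int × List (Int × Int))} {src : Int} {ord : List Int}
    {m : PySem.Dict Int Int} {i : Int} {Q : List Int} {vn : PySem.Set Int}
    {ve vs : PySem.Set (Int × Int)}
    (hG : PvBfsGood D src ord m) (hA : PvAInv D ord m i Q vn ve vs)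
    (hi : 0 ≤ i) (hle : i ≤ pvDepth m) : 0 < Q.length := by
  obtain ⟨_, ⟨w, hw, hwd⟩, hd0⟩ := pv_depth_spec D src ord m hG
  obtain ⟨x, hx, hxd⟩ := pv_exists_at D src ord m hG (pvDepth m).toNat w hw
    (by rw [hwd]; exact (Int.toNat_of_nonneg hd0).symm) i.toNat (by omega)
  have hxQ : x ∈ Q := (hA.hQ x).mpr ⟨hx, by rw [hxd]; omega⟩
  exact List.length_pos_of_mem hxQ

theorem pv_Q_empty {D : List (Int × List (Int × Int))} {src : Int} {ord : List Int}
    {m : PySem.Dict Int Int} {i : Int} {Q : List Int} {vn : PySem.Set Int}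
    {ve vs : PySem.Set (Int × Int)}
    (hG : PvBfsGood D src ord m) (hA : PvAInv D ord m i Q vn ve vs)
    (hgt : pvDepth m < i) : Q = [] := by
  obtain ⟨hub, _, _⟩ := pv_depth_spec D src ord m hG
  rw [List.eq_nil_iff_forall_not_mem]
  intro v hv
  obtain ⟨ho, hm⟩ := (hA.hQ v).mp hv
  have := hub v ho
  omega

theorem pv_loopA_run {D : List (Int × List (Int × Int))} {src : Int} {ord : List Int}
    {m : PySem.Dict Int Int} (hG : PvBfsGood D src ord m) :
    ∀ (fuel i : Nat) (Q : List Int) (vn : PySem.Set Int) (ve vs : PySem.Set (Int × Int))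
      (an ae asv : List Int),
      PvAInv D ord m (i : Int) Q vn ve vs → i ≤ (pvDepth m).toNat + 1 →
      ((pvDepth m).toNat + 1 - i) + 1 ≤ fuel →
      pvLoopA D fuel Q vn ve vs an ae asv =
        (an ++ ((List.range' i ((pvDepth m).toNat + 1 - i)).map
            fun (j : Nat) => (pvCntN m ord (j : Int) : Int)),
         ae ++ ((List.range' i ((pvDepth m).toNat + 1 - i)).map
            fun (j : Nat) => (pvCntE D m ord (j : Int) : Int)),
         asv ++ ((List.range' i ((pvDepth m).toNat + 1 - i)).map
            fun (j : Nat) => (pvCntS D m ord (j : Int) : Int))) := by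
  intro fuel
  induction fuel with
  | zero => intro i Q vn ve vs an ae asv _ _ hf; omega
  | succ fuel ih =>
    intro i Q vn ve vs an ae asv hA hiN hf
    by_cases hiN' : i = (pvDepth m).toNat + 1
    · have hQe : Q = [] := pv_Q_empty hG hA (by
        obtain ⟨_, _, hd0⟩ := pv_depth_spec D src ord m hG
        omega)
      subst hQe
      rw [pvLoopA]
      simp [hiN']
    · have hd0 : 0 ≤ pvDepth m := (pv_depth_spec D src ord m hG).2.2
      have hQpos : 0 < Q.length := pv_Q_nonempty hG hA (by positivity) (by omega)
      have hcast : ((i + 1 : Nat) : Int) = (i : Int) + 1 := by push_cast; ring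
      have hstep := pv_AInv_step hG (by positivity) hA
      rw [← hcast] at hstep
      have hrec := ih (i + 1) _ _ _ _
        (an ++ [(pvCntN m ord (i : Int) : Int)])
        (ae ++ [(pvCntE D m ord (i : Int) : Int)])
        (asv ++ [(pvCntS D m ord (i : Int) : Int)])
        hstep (by omega) (by omega)
      rw [pvLoopA, if_pos hQpos, pv_levelA_eq]
      have hN := pv_cntN_eq hG (by positivity) hA
      have hE := pv_cntE_eq hG hA
      have hS := pv_cntS_eq hG hA
      simp only [hN, hE, hS] at hrec ⊢
      rw [hrec]
      have hrange : List.range' i ((pvDepth m).toNat + 1 - i)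
          = i :: List.range' (i + 1) ((pvDepth m).toNat + 1 - (i + 1)) := by
        have h1 : (pvDepth m).toNat + 1 - i = ((pvDepth m).toNat + 1 - (i + 1)) + 1 := by omega
        rw [h1, List.range'_succ]
      rw [hrange]
      simp

theorem pv_AInv_init {D : List (Int × List (Int × Int))} {src : Int} {ord : List Int}
    {m : PySem.Dict Int Int} (hG : PvBfsGood D src ord m) :
    PvAInv D ord m 0 [src] (PySem.Set.ofList [src]) PySem.Set.empty PySem.Set.empty := by
  have hsrc : src ∈ ord := by simpa using hG.hsrcMem
  have hsz : pvMd m src = 0 := hG.hsrcZero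
  have hnn : ∀ v ∈ ord, 0 ≤ pvMd m v := by
    intro v hv; exact hG.hnonneg v (by simpa using hv)
  have hzs : ∀ v ∈ ord, pvMd m v = 0 → v = src := by
    intro v hv; exact hG.hzeroSrc v (by simpa using hv)
  constructor
  case hQnd => simp
  case hQ =>
    intro v
    simp only [List.mem_singleton]
    constructor
    · rintro rfl; exact ⟨hsrc, hsz⟩
    · rintro ⟨h1, h2⟩; exact hzs v h1 h2
  case hvn =>
    intro v
    rw [PySem.Set.mem_ofList]
    simp only [List.mem_singleton]
    constructor
    · rintro rfl; exact ⟨hsrc, by omega⟩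
    · rintro ⟨h1, h2⟩
      have := hnn v h1
      exact hzs v h1 (by omega)
  case hve =>
    intro e
    constructor
    · intro h; exact absurd h (by simp [PySem.Set.empty])
    · rintro ⟨q, h1, h2, _, _⟩
      have := hnn q.1 h1
      omega
  case hvs =>
    intro p
    constructor
    · intro h; exact absurd h (by simp [PySem.Set.empty])
    · rintro (⟨h1, h2, _⟩ | ⟨h1, h2, _⟩)
      · have := hnn p.1 h1; omega
      · have := hnn p.2 h1; omega

theorem pv_A_eq (source_node : Int) (D : List (Int × List (Int × Int))) :
    COLLECT_VECTOR source_node D =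
      (((List.range ((pvDepth (pvRun source_node D).2).toNat + 1)).map
          fun (j : Nat) => (pvCntN (pvRun source_node D).2 (pvRun source_node D).1 (j : Int) : Int)),
       ((List.range ((pvDepth (pvRun source_node D).2).toNat + 1)).map
          fun (j : Nat) => (pvCntE D (pvRun source_node D).2 (pvRun source_node D).1 (j : Int) : Int)),
       ((List.range ((pvDepth (pvRun source_node D).2).toNat + 1)).map
          fun (j : Nat) => (pvCntS D (pvRun source_node D).2 (pvRun source_node D).1 (j : Int) : Int))) := by
  have hG := pv_bfs_good source_node D
  have hfuel : ((pvDepth (pvRun source_node D).2).toNat + 1 - 0) + 1 ≤ pvFuel D := by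
    have h1 := pv_depth_le D source_node _ _ hG
    have h2 := pv_bfs_len D source_node _ [] _ hG
    rw [pv_allVals_len] at h2
    simp only [List.append_nil] at h2
    rw [pvFuel]
    omega
  rw [COLLECT_VECTOR]
  rw [pv_loopA_run hG (pvFuel D) 0 [source_node] _ _ _ [] [] [] (pv_AInv_init hG)
    (by omega) hfuel]
  simp [List.range_eq_range']


-- ===== B-side phase 2: characterizing the tally folds =====

theorem pv_foldl_split {β : Type} (l : List β) (f g : List Int → β → List Int) :
    ∀ ab : List Int × List Int,
      l.foldl (fun s e => (f s.1 e, g s.2 e)) ab = (l.foldl f ab.1, l.foldl g ab.2) := by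
  induction l with
  | nil => intro ab; simp
  | cons e t ih =>
    intro ab
    rw [List.foldl_cons, List.foldl_cons, List.foldl_cons, ih]

theorem pv_foldl_bump {β : Type} (pred : β → Prop) [DecidablePred pred] (idx : β → Int) :
    ∀ (events : List β) (init : List Int),
      (∀ e ∈ events, pred e → 0 ≤ idx e ∧ idx e < (init.length : Int)) →
      ((events.foldl (fun vec e => if pred e then pvBump vec (idx e) else vec) init).length
          = init.length
        ∧ ∀ k : Nat, k < init.length →
          (events.foldl (fun vec e => if pred e then pvBump vec (idx e) else vec) init).getD k 0
            = init.getD k 0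
              + (events.countP (fun e => decide (pred e) && (idx e == (k : Int))) : Int)) := by
  intro events
  induction events with
  | nil => intro init _; simp
  | cons e t ih =>
    intro init hin
    rw [List.foldl_cons]
    by_cases hp : pred e
    · have h0 := hin e List.mem_cons_self hp
      have hcast : idx e = ((idx e).toNat : Int) := (Int.toNat_of_nonneg h0.1).symm
      have hIlt : (idx e).toNat < init.length := by omega
      have hite : (if pred e then pvBump init (idx e) else init) = pvBump init (idx e) :=
        if_pos hp
      have hlen : (pvBump init (idx e)).length = init.length := by
        rw [pvBump, PySem.List.length_pySetD]
      have hget : ∀ k : Nat, k < init.length →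
          (pvBump init (idx e)).getD k 0
            = if k = (idx e).toNat then init.getD (idx e).toNat 0 + 1 else init.getD k 0 := by
        intro k hk
        rw [pvBump, hcast, ← PySem.List.pyGetD_natCast _ k (0 : Int),
          PySem.List.pyGetD_pySetD_natCast _ _ _ _ _ hIlt,
          PySem.List.pyGetD_natCast, PySem.List.pyGetD_natCast]
        simp only [Int.toNat_natCast]
      obtain ⟨ih1, ih2⟩ := ih (pvBump init (idx e)) (by
        intro e' he' hp'
        rw [hlen]
        exact hin e' (List.mem_cons_of_mem _ he') hp')
      rw [hite]
      constructor
      · rw [ih1, hlen]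
      · intro k hk
        rw [ih2 k (by rw [hlen]; exact hk), hget k hk, List.countP_cons]
        by_cases hke : k = (idx e).toNat
        · have heq : idx e = (k : Int) := by omega
          have hb : (decide (pred e) && (idx e == (k : Int))) = true := by simp [hp, heq]
          rw [if_pos hke, ← hke]
          simp only [hb]
          norm_num
          push_cast
          omega
        · have hne : idx e ≠ (k : Int) := by omega
          have hb : (decide (pred e) && (idx e == (k : Int))) = false := by simp [hne]
          rw [if_neg hke]
          simp only [hb]
          norm_num
    · have hite : (if pred e then pvBump init (idx e) else init) = init := if_neg hp
      rw [hite]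
      obtain ⟨ih1, ih2⟩ := ih init (fun e' he' => hin e' (List.mem_cons_of_mem _ he'))
      refine ⟨ih1, fun k hk => ?_⟩
      rw [ih2 k hk, List.countP_cons]
      simp [hp]


theorem pv_B_eq (source_node : Int) (D : List (Int × List (Int × Int))) :
    COLLECT_VECTOR_alt source_node D =
      (((List.range ((pvDepth (pvRun source_node D).2).toNat + 1)).map
          fun (j : Nat) => (pvCntN (pvRun source_node D).2 (pvRun source_node D).1 (j : Int) : Int)),
       ((List.range ((pvDepth (pvRun source_node D).2).toNat + 1)).map
          fun (j : Nat) => (pvCntE D (pvRun source_node D).2 (pvRun source_node D).1 (j : Int) : Int)),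
       ((List.range ((pvDepth (pvRun source_node D).2).toNat + 1)).map
          fun (j : Nat) => (pvCntS D (pvRun source_node D).2 (pvRun source_node D).1 (j : Int) : Int))) := by
  have hG := pv_bfs_good source_node D
  have hrun : pvBfsLoop D (pvFuel D) [] [source_node]
      (PySem.Dict.ofList [(source_node, 0)]) = pvRun source_node D := rfl
  set r := pvRun source_node D with hr
  set m := r.2 with hm
  set ord := r.1 with hord
  obtain ⟨hub, hex, hd0⟩ := pv_depth_spec D source_node ord m hG
  have hN : (pvDepth m + 1).toNat = (pvDepth m).toNat + 1 := by omega
  set N := (pvDepth m).toNat + 1 with hNdef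
  have hNc : ((N : Nat) : Int) = pvDepth m + 1 := by
    rw [hNdef]
    push_cast
    omega
  have hvals : m.values = ord.map (pvMd m) := pv_values_eq D source_node ord m hG
  have hzlen : (List.replicate N (0 : Int)).length = N := List.length_replicate
  have hmdb : ∀ v ∈ ord, 0 ≤ pvMd m v ∧ pvMd m v ≤ pvDepth m := by
    intro v hv
    exact ⟨hG.hnonneg v (by simpa using hv), hub v hv⟩
  -- node vector
  have hnode := pv_foldl_bump (fun dv : Int => 0 < dv) (fun dv => dv - 1) m.values
    (List.replicate N 0) (by
      intro dv hdv hpos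
      rw [hvals] at hdv
      obtain ⟨v, hv, rfl⟩ := List.mem_map.mp hdv
      obtain ⟨h1, h2⟩ := hmdb v hv
      rw [hzlen]
      dsimp only
      constructor <;> omega)
  -- edge/stub vectors
  have harcin : ∀ p ∈ pvPairs D ord, 0 ≤ m.getD p.1 0 ∧
      m.getD p.1 0 < ((List.replicate N (0 : Int)).length : Int) := by
    intro p hp
    obtain ⟨h1, _⟩ := (pv_mem_pairs D ord p).mp hp
    obtain ⟨ha, hb⟩ := hmdb p.1 h1
    simp only [pvMd] at ha hb
    rw [hzlen]
    constructor <;> omega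
  have hedge := pv_foldl_bump (fun p : Int × Int => pvEdgeOK D m p.1 p.2 = true)
    (fun p => m.getD p.1 0) (pvPairs D ord) (List.replicate N 0)
    (fun p hp _ => harcin p hp)
  have hstub := pv_foldl_bump (fun p : Int × Int => pvStubOK D m p.1 p.2 = true)
    (fun p => m.getD p.1 0) (pvPairs D ord) (List.replicate N 0)
    (fun p hp _ => harcin p hp)
  -- unfold the port
  show (let r' := pvBfsLoop D (pvFuel D) [] [source_node] (PySem.Dict.ofList [(source_node, 0)])
    let m' := r'.2
    let depth := (PySem.List.max? m'.values (fun x => x)).getD 0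
    let zeros : List Int := List.replicate (depth + 1).toNat 0
    let node_vec := m'.values.foldl
      (fun vec dv => if 0 < dv then pvBump vec (dv - 1) else vec) zeros
    let es := r'.1.foldl (fun (p : List Int × List Int) u =>
        (pvNeighbors D u).foldl (fun (q : List Int × List Int) v =>
          (if pvEdgeOK D m' u v then pvBump q.1 (m'.getD u 0) else q.1,
           if pvStubOK D m' u v then pvBump q.2 (m'.getD u 0) else q.2)) p)
      (zeros, zeros)
    (node_vec, es.1, es.2)) = _
  simp only [hrun, ← hr, ← hm, ← hord]
  have hdepth : (PySem.List.max? m.values (fun x => x)).getD 0 = pvDepth m := rfl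
  simp only [hdepth, hN, ← hNdef]
  -- rewrite the nested edge/stub fold into a flat fold over arcs, then split the pair
  rw [pv_nested_foldl ord (pvNeighbors D)
    (fun u (q : List Int × List Int) v =>
      (if pvEdgeOK D m u v then pvBump q.1 (m.getD u 0) else q.1,
       if pvStubOK D m u v then pvBump q.2 (m.getD u 0) else q.2))
    (List.replicate N 0, List.replicate N 0)]
  have hsplit : (List.foldl
      (fun (s : List Int × List Int) (p : Int × Int) =>
        (if pvEdgeOK D m p.1 p.2 = true then pvBump s.1 (m.getD p.1 0) else s.1,
         if pvStubOK D m p.1 p.2 = true then pvBump s.2 (m.getD p.1 0) else s.2))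
      (List.replicate N 0, List.replicate N 0)
      (List.flatMap (fun u => List.map (fun v => (u, v)) (pvNeighbors D u)) ord))
    = ((pvPairs D ord).foldl
        (fun vec (q : Int × Int) =>
          if pvEdgeOK D m q.1 q.2 = true then pvBump vec (m.getD q.1 0) else vec)
        (List.replicate N 0),
       (pvPairs D ord).foldl
        (fun vec (q : Int × Int) =>
          if pvStubOK D m q.1 q.2 = true then pvBump vec (m.getD q.1 0) else vec)
        (List.replicate N 0)) :=
    pv_foldl_split
      (List.flatMap (fun u => List.map (fun v => (u, v)) (pvNeighbors D u)) ord)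
      (fun vec (q : Int × Int) =>
        if pvEdgeOK D m q.1 q.2 = true then pvBump vec (m.getD q.1 0) else vec)
      (fun vec (q : Int × Int) =>
        if pvStubOK D m q.1 q.2 = true then pvBump vec (m.getD q.1 0) else vec)
      (List.replicate N 0, List.replicate N 0)
  rw [hsplit]
  have hcnode : List.foldl (fun vec dv => if 0 < dv then pvBump vec (dv - 1) else vec)
      (List.replicate N 0) m.values
      = (List.range N).map (fun (j : Nat) => (pvCntN m ord (j : Int) : Int)) := by
    apply List.ext_getElem
    · rw [hnode.1, hzlen, List.length_map, List.length_range]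
    · intro k h1 h2
      have hk0 : k < N := by
        rw [hnode.1, hzlen] at h1
        exact h1
      have hkz : k < (List.replicate N (0 : Int)).length := by rw [hzlen]; exact hk0
      have hval := hnode.2 k hkz
      rw [List.getD_eq_getElem _ _ h1] at hval
      rw [List.getElem_map, List.getElem_range, hval]
      rw [hvals, List.countP_map]
      rw [List.countP_congr (q := fun v => pvMd m v == (k : Int) + 1) ?_]
      · rw [pvCntN, pvLvl, ← List.countP_eq_length_filter]
        simp
      · intro v _
        simp only [Function.comp_apply, Bool.and_eq_true, decide_eq_true_eq, beq_iff_eq]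
        omega
  have hcedge : List.foldl
      (fun vec (q : Int × Int) =>
        if pvEdgeOK D m q.1 q.2 = true then pvBump vec (m.getD q.1 0) else vec)
      (List.replicate N 0) (pvPairs D ord)
      = (List.range N).map (fun (j : Nat) => (pvCntE D m ord (j : Int) : Int)) := by
    apply List.ext_getElem
    · rw [hedge.1, hzlen, List.length_map, List.length_range]
    · intro k h1 h2
      have hk0 : k < N := by
        rw [hedge.1, hzlen] at h1
        exact h1
      have hkz : k < (List.replicate N (0 : Int)).length := by rw [hzlen]; exact hk0
      have hval := hedge.2 k hkz
      rw [List.getD_eq_getElem _ _ h1] at hval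
      rw [List.getElem_map, List.getElem_range, hval]
      rw [List.countP_congr
        (q := fun p => (pvMd m p.1 == (k : Int)) && pvEdgeOK D m p.1 p.2) ?_]
      · rw [pvCntE]
        simp
      · intro p _
        simp only [Bool.and_eq_true, decide_eq_true_eq, beq_iff_eq, pvMd]
        tauto
  have hcstub : List.foldl
      (fun vec (q : Int × Int) =>
        if pvStubOK D m q.1 q.2 = true then pvBump vec (m.getD q.1 0) else vec)
      (List.replicate N 0) (pvPairs D ord)
      = (List.range N).map (fun (j : Nat) => (pvCntS D m ord (j : Int) : Int)) := by
    apply List.ext_getElem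
    · rw [hstub.1, hzlen, List.length_map, List.length_range]
    · intro k h1 h2
      have hk0 : k < N := by
        rw [hstub.1, hzlen] at h1
        exact h1
      have hkz : k < (List.replicate N (0 : Int)).length := by rw [hzlen]; exact hk0
      have hval := hstub.2 k hkz
      rw [List.getD_eq_getElem _ _ h1] at hval
      rw [List.getElem_map, List.getElem_range, hval]
      rw [List.countP_congr
        (q := fun p => (pvMd m p.1 == (k : Int)) && pvStubOK D m p.1 p.2) ?_]
      · rw [pvCntS]
        simp
      · intro p _
        simp only [Bool.and_eq_true, decide_eq_true_eq, beq_iff_eq, pvMd]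
        tauto
  rw [hcnode, hcedge, hcstub]

-- ===== VERDICT (by name: the statement is the Claim_ definition above) =====
theorem COLLECT_VECTOR_spec : Claim_equal_COLLECT_VECTOR := by
  intro source_node D _ _
  unfold Spec_COLLECT_VECTOR
  rw [pv_A_eq, pv_B_eq]
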